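-- pv_equiv track=rewrite | github.com/AmishaBisht/Basic-Python | commonfactor.py | CommonFactor
-- ===== SOURCE A (Python) =====
-- def CommonFactor(a,b):
--     fact1=[]
--     Commonfact=[]
--
--
--     for i in range(1,10):
--         if a%i==0:
--             fact1.append(i)
--
--     for j in range(1,10):
--         if b%j==0:
--             fact1.append(j)
--     size=len(fact1)
--     for i in range(size):
--         k=i+1
--         for j in range(k,size):
--             if fact1[i]==fact1[j] and fact1[i] not in Commonfact:
--                 Commonfact.append(fact1[i])
--                 number_of_elements=len(Commonfact)
--     return number_of_elements
-- ===== SOURCE B (Python) =====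
-- def CommonFactor(a, b):
--     return sum(1 for i in range(1, 10) if a % i == 0 and b % i == 0)
-- ===== Notes on version B (the rewrite author's own statement) =====
-- stated objective: simpler
-- what changed: Replaces the build-two-divisor-lists-then-nested-duplicate-scan strategy with a single direct pass over 1..9 counting i that divide both a and b.
import Mathlib
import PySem

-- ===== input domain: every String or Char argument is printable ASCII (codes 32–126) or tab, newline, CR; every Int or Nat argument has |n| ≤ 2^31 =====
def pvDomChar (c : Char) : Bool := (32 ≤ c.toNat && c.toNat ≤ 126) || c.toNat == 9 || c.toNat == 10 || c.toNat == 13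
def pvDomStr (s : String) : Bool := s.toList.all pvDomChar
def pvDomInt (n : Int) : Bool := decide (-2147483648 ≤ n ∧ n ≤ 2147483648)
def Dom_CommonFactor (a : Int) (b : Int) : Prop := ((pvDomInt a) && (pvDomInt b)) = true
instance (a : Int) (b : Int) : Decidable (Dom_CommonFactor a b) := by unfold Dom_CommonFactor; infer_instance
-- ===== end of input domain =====

-- B replaces A's build-two-divisor-lists-then-nested-duplicate-scan with one direct counting
-- pass over 1..9 testing divisibility of both arguments (objective: simpler).

-- ===== PORT A =====
-- A-side helper: the body of A's innermost loop ('for j in range(k, size): …').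
def pvA_inner (fact1 : List Int) (i : Int) (st : List Int × Option Int) (j : Int) :
    List Int × Option Int :=
  match PySem.List.pyGet? fact1 i, PySem.List.pyGet? fact1 j with
  | some xi, some xj =>
      if xi = xj ∧ xi ∉ st.1 then (st.1 ++ [xi], some (((st.1 ++ [xi]).length : Int)))
      else st
  | _, _ => st

def CommonFactor (a : Int) (b : Int) : Int :=
  let fact1 := (PySem.List.pyRange 1 10 1).foldl
    (fun l i => if PySem.Int.mod a i = 0 then l ++ [i] else l) ([] : List Int)
  let fact1 := (PySem.List.pyRange 1 10 1).foldl
    (fun l j => if PySem.Int.mod b j = 0 then l ++ [j] else l) fact1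
  let size := (fact1.length : Int)
  let st := (PySem.List.pyRange 0 size 1).foldl
    (fun st i =>
      let k := i + 1
      (PySem.List.pyRange k size 1).foldl (pvA_inner fact1 i) st)
    (([] : List Int), (none : Option Int))
  match st.2 with
  | some n => n
  | none => 0   -- Python would raise NameError here; unreachable (1 is appended for both a and b)

-- ===== PORT B =====
def CommonFactor_alt (a : Int) (b : Int) : Int :=
  (((PySem.List.pyRange 1 10 1).filter
      (fun i => decide (PySem.Int.mod a i = 0 ∧ PySem.Int.mod b i = 0))).map
    (fun _ => (1 : Int))).sum

-- ===== PRECONDITION & SPEC =====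
def Spec_CommonFactor (a : Int) (b : Int) (out : Int) : Prop := out = CommonFactor_alt a b
instance (a : Int) (b : Int) (out : Int) : Decidable (Spec_CommonFactor a b out) := by unfold Spec_CommonFactor; infer_instance

-- ===== CLAIM (what is proved, stated in full; the proofs are below) =====
def Claim_equal_CommonFactor : Prop := ∀ (a : Int) (b : Int), Dom_CommonFactor a b → Spec_CommonFactor a b (CommonFactor a b)

-- ===== LEMMAS AND PROOFS =====

-- Proof-side model of A's nested duplicate scan: walk the list, appending each element that
-- still occurs later and is not yet collected (second component = length after the append).
def pvScan : List Int → List Int × Option Int → List Int × Option Int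
  | [], st => st
  | x :: rest, st =>
      pvScan rest
        (if x ∈ rest ∧ x ∉ st.1 then (st.1 ++ [x], some ((st.1.length : Int) + 1)) else st)

lemma pvA_inner_spec (L : List Int) (i : Int) (xi : Int)
    (hi : PySem.List.pyGet? L i = some xi) :
    ∀ (m : Nat) (k : Int) (C : List Int) (n : Option Int), 0 ≤ k → m = L.length - k.toNat →
    (PySem.List.pyRange k (L.length : Int) 1).foldl (pvA_inner L i) (C, n)
      = if xi ∈ L.drop k.toNat ∧ xi ∉ C then (C ++ [xi], some ((C.length : Int) + 1))
        else (C, n) := by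
  intro m
  induction m with
  | zero =>
    intro k C n hk hm
    have hlen : (L.length : Int) ≤ k := by omega
    rw [PySem.List.pyRange_one_eq_nil hlen]
    have : L.drop k.toNat = [] := List.drop_eq_nil_of_le (by omega)
    simp [this]
  | succ m ih =>
    intro k C n hk hm
    have hklt : k < (L.length : Int) := by omega
    have hknat : k.toNat < L.length := by omega
    rw [PySem.List.pyRange_one_cons hklt]
    rw [List.foldl_cons]
    have hgetk : PySem.List.pyGet? L k = some L[k.toNat] :=
      PySem.List.pyGet?_eq_some_getElem L hk hklt
    have hdrop : L.drop k.toNat = L[k.toNat] :: L.drop (k.toNat + 1) :=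
      List.drop_eq_getElem_cons hknat
    have hnat1 : (k + 1).toNat = k.toNat + 1 := by omega
    simp only [pvA_inner, hi, hgetk]
    by_cases hx : xi = L[k.toNat]
    · by_cases hc : xi ∈ C
      · rw [if_neg (fun h => h.2 hc)]
        rw [ih (k + 1) C n (by omega) (by omega), hnat1, hdrop]
        simp [hc]
      · rw [if_pos ⟨hx, hc⟩]
        rw [ih (k + 1) (C ++ [xi]) (some (((C ++ [xi]).length : Int))) (by omega) (by omega),
          hnat1]
        have hmem : xi ∈ C ++ [xi] := by simp
        have hmemdrop : xi ∈ List.drop k.toNat L := by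
          rw [hdrop, hx]
          exact List.mem_cons_self
        rw [if_neg (fun h => h.2 hmem), if_pos ⟨hmemdrop, hc⟩]
        simp
    · rw [if_neg (fun h => hx h.1)]
      rw [ih (k + 1) C n (by omega) (by omega), hnat1]
      by_cases hc : xi ∈ C
      · simp [hc]
      · have hiff : xi ∈ List.drop k.toNat L ↔ xi ∈ List.drop (k.toNat + 1) L := by
          rw [hdrop, List.mem_cons]
          exact ⟨fun h => h.resolve_left hx, Or.inr⟩
        simp only [hiff]

lemma pvA_outer_spec (L : List Int) :
    ∀ (m : Nat) (k : Int), 0 ≤ k → m = L.length - k.toNat →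
    ∀ (st : List Int × Option Int),
    (PySem.List.pyRange k (L.length : Int) 1).foldl
      (fun st i => (PySem.List.pyRange (i + 1) (L.length : Int) 1).foldl (pvA_inner L i) st) st
      = pvScan (L.drop k.toNat) st := by
  intro m
  induction m with
  | zero =>
    intro k hk hm st
    have hlen : (L.length : Int) ≤ k := by omega
    rw [PySem.List.pyRange_one_eq_nil hlen]
    have : L.drop k.toNat = [] := List.drop_eq_nil_of_le (by omega)
    simp [this, pvScan]
  | succ m ih =>
    intro k hk hm st
    have hklt : k < (L.length : Int) := by omega
    have hknat : k.toNat < L.length := by omega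
    rw [PySem.List.pyRange_one_cons hklt, List.foldl_cons]
    have hgetk : PySem.List.pyGet? L k = some L[k.toNat] :=
      PySem.List.pyGet?_eq_some_getElem L hk hklt
    have hnat1 : (k + 1).toNat = k.toNat + 1 := by omega
    obtain ⟨C, n⟩ := st
    rw [pvA_inner_spec L k L[k.toNat] hgetk (L.length - (k + 1).toNat) (k + 1) C n
      (by omega) rfl]
    rw [ih (k + 1) (by omega) (by omega), hnat1]
    have hdrop : L.drop k.toNat = L[k.toNat] :: L.drop (k.toNat + 1) :=
      List.drop_eq_getElem_cons hknat
    rw [hdrop]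
    simp only [pvScan]

-- scanning a duplicate-free suffix changes nothing
lemma pvScan_nodup (ys : List Int) (h : ys.Nodup) (st : List Int × Option Int) :
    pvScan ys st = st := by
  induction ys generalizing st with
  | nil => rfl
  | cons y rest ih =>
    have hy : y ∉ rest := (List.nodup_cons.mp h).1
    simp only [pvScan]
    rw [if_neg (fun hc : y ∈ rest ∧ y ∉ st.1 => hy hc.1)]
    exact ih (List.nodup_cons.mp h).2 st

lemma pvScan_append (xs : List Int) (ys : List Int) (hys : ys.Nodup) :
    ∀ (C : List Int) (n : Option Int), xs.Nodup → (∀ x ∈ xs, x ∉ C) →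
    pvScan (xs ++ ys) (C, n)
      = (C ++ xs.filter (· ∈ ys),
         if xs.filter (· ∈ ys) = [] then n
         else some (((C ++ xs.filter (· ∈ ys)).length : Int))) := by
  induction xs with
  | nil =>
    intro C n _ _
    simp [pvScan_nodup ys hys]
  | cons x xs' ih =>
    intro C n hnd hC
    have hx' : x ∉ xs' := (List.nodup_cons.mp hnd).1
    have hnd' : xs'.Nodup := (List.nodup_cons.mp hnd).2
    have hxC : x ∉ C := hC x (by simp)
    simp only [List.cons_append, pvScan]
    by_cases hxy : x ∈ ys
    · rw [if_pos ⟨by simp [hxy], hxC⟩]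
      rw [ih (C ++ [x]) (some ((C.length : Int) + 1)) hnd'
        (by intro z hz; simp; exact ⟨hC z (by simp [hz]), fun he => hx' (he ▸ hz)⟩)]
      have hfil : (x :: xs').filter (· ∈ ys) = x :: xs'.filter (· ∈ ys) := by
        simp [hxy]
      rw [hfil]
      by_cases hf : xs'.filter (· ∈ ys) = []
      · simp [hf]
      · rw [if_neg hf, if_neg (by simp)]
        simp only [List.append_assoc, List.singleton_append]
    · rw [if_neg (by rintro ⟨hm, -⟩; simp [hx', hxy] at hm)]
      rw [ih C n hnd' (fun z hz => hC z (by simp [hz]))]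
      have hfil : (x :: xs').filter (· ∈ ys) = xs'.filter (· ∈ ys) := by
        simp [hxy]
      rw [hfil]

lemma pv_main (a : Int) (b : Int) : CommonFactor a b = CommonFactor_alt a b := by
  simp only [CommonFactor]
  rw [PySem.List.foldl_append_ite_eq_filter, PySem.List.foldl_append_ite_eq_filter]
  set pa : Int → Bool := fun i => decide (PySem.Int.mod a i = 0) with hpa
  set pb : Int → Bool := fun j => decide (PySem.Int.mod b j = 0) with hpb
  set R : List Int := PySem.List.pyRange 1 10 1 with hRdef
  set L : List Int := [] ++ R.filter pa ++ R.filter pb with hL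
  have hRnd : R.Nodup := by decide
  have h1R : (1 : Int) ∈ R := by decide
  have h1a : (1 : Int) ∈ R.filter pa :=
    List.mem_filter.mpr ⟨h1R, by simp [hpa]⟩
  have h1b : (1 : Int) ∈ R.filter pb :=
    List.mem_filter.mpr ⟨h1R, by simp [hpb]⟩
  rw [pvA_outer_spec L (L.length - (0 : Int).toNat) 0 (by omega) rfl]
  simp only [Int.toNat_zero, List.drop_zero]
  have hLsplit : L = R.filter pa ++ R.filter pb := by simp [hL]
  rw [hLsplit, pvScan_append (R.filter pa) (R.filter pb) (hRnd.filter pb) [] none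
    (hRnd.filter pa) (by simp)]
  have hfne : (R.filter pa).filter (· ∈ R.filter pb) ≠ [] := by
    intro h
    have hmem : (1 : Int) ∈ (R.filter pa).filter (· ∈ R.filter pb) :=
      List.mem_filter.mpr ⟨h1a, by simp [h1b]⟩
    rw [h] at hmem
    simp at hmem
  rw [if_neg hfne]
  simp only [List.nil_append]
  -- both sides count the same factors
  have hlen : ((R.filter pa).filter (· ∈ R.filter pb)).length
      = (R.filter (fun i => pa i && pb i)).length := by
    rw [List.filter_filter]
    congr 1
    apply List.filter_congr
    intro x hx
    by_cases h2 : pb x = true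
    · simp [List.mem_filter, hx, h2]
    · simp [List.mem_filter, hx, h2]
  simp only [CommonFactor_alt]
  have hpred : (fun i => decide (PySem.Int.mod a i = 0 ∧ PySem.Int.mod b i = 0))
      = fun i => pa i && pb i := by
    funext i
    by_cases h1 : PySem.Int.mod a i = 0 <;> by_cases h2 : PySem.Int.mod b i = 0 <;>
      simp [hpa, hpb, h1, h2]
  rw [hpred, PySem.List.sum_map_const_int, hlen]
  ring

-- ===== VERDICT (by name: the statement is the Claim_ definition above) =====
theorem CommonFactor_spec : Claim_equal_CommonFactor := by
  intro a b _
  exact pv_main a b
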